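-- pv_equiv track=rewrite | github.com/KREnZE1/Web-Crawling | DND Spells/tutorial/spiders/Searcher.py | castLow
-- ===== SOURCE A (Python) =====
-- def castLow(word):
--     name = ""
--     for letter in word:
--         if ord(letter) == 39: letter = ""
--         elif (ord(letter)<65 or (ord(letter)>90 and ord(letter)<97) or ord(letter)>122):
--             letter = '-'
--
--         name+=letter
--
--     return name.lower()
-- ===== SOURCE B (Python) =====
-- import re
--
-- def castLow(word):
--     return re.sub(r"[^a-z]", "-", word.replace("'", "").lower())
-- ===== Notes on version B (the rewrite author's own statement) =====
-- stated objective: idiomatic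
-- what changed: Replaced the per-character ord() branching loop (with quadratic-ish string concatenation) by a declarative pipeline: strip apostrophes via str.replace, lowercase once, then one regex substitution turning every non-[a-z] character into a dash.
import Mathlib
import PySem

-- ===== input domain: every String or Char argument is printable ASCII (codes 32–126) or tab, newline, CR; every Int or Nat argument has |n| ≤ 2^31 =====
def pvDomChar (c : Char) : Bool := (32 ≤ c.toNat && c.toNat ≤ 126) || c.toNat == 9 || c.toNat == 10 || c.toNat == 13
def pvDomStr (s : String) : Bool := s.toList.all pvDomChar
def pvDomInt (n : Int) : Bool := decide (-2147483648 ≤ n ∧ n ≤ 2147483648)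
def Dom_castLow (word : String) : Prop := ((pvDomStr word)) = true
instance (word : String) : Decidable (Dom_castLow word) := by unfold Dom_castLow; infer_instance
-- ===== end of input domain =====

-- B replaces A's per-character ord() branching loop with one declarative pass:
-- drop apostrophes, lowercase, then substitute every non-[a-z] character by '-' (a regex in Python).

-- ===== PORT A =====
def castLow (word : String) : String :=
  PySem.Str.lower (String.ofList (word.toList.foldl
    (fun name letter =>
      if letter.toNat == 39 then name
      else if letter.toNat < 65 ∨ (letter.toNat > 90 ∧ letter.toNat < 97) ∨ letter.toNat > 122 then
        name ++ ['-']
      else name ++ [letter]) []))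

-- ===== PORT B =====
-- re.sub(r"[^a-z]", "-", s) for this single-character class is exactly a per-character map.
def castLow_alt (word : String) : String :=
  String.ofList
    (((PySem.Str.lower (PySem.Str.replace word "'" "")).toList).map
      (fun c => if 'a' ≤ c ∧ c ≤ 'z' then c else '-'))

-- ===== PRECONDITION & SPEC =====
def Spec_castLow (word : String) (out : String) : Prop := out = castLow_alt word
instance (word : String) (out : String) : Decidable (Spec_castLow word out) := by unfold Spec_castLow; infer_instance

-- ===== CLAIM (what is proved, stated in full; the proofs are below) =====
def Claim_equal_castLow : Prop := ∀ (word : String), Dom_castLow word → Spec_castLow word (castLow word)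

-- ===== LEMMAS AND PROOFS =====

/-- A's per-character contribution to `name`. -/
def pvStepA (c : Char) : List Char :=
  if c.toNat == 39 then []
  else if c.toNat < 65 ∨ (c.toNat > 90 ∧ c.toNat < 97) ∨ c.toNat > 122 then ['-']
  else [c]

/-- B's clamp: the `[^a-z] → '-'` substitution on one character. -/
def pvClamp (c : Char) : Char := if 'a' ≤ c ∧ c ≤ 'z' then c else '-'

/-- Per-character agreement, as a decidable predicate. -/
def pvCharOK (c : Char) : Prop :=
  (pvStepA c).map PySem.Chars.lowerChar =
    if c == '\'' then [] else [pvClamp (PySem.Chars.lowerChar c)]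

lemma pvCharOK_all : ∀ n : Fin 128, pvCharOK (Char.ofNat n.val) := by
  unfold pvCharOK; decide

lemma pvCharOK_of_lt (c : Char) (h : c.toNat < 128) : pvCharOK c := by
  have := pvCharOK_all ⟨c.toNat, h⟩
  simpa [Char.ofNat_toNat] using this

lemma pvReplace_go_single (q : Char) :
    ∀ (l : List Char) (fuel : Nat) (acc : List Char), l.length ≤ fuel →
      PySem.Chars.replace.go [q] [] fuel l acc =
        acc.reverse ++ l.filter (fun c => !(c == q)) := by
  intro l
  induction l with
  | nil =>
      intro fuel acc _
      cases fuel <;> simp [PySem.Chars.replace.go]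
  | cons c t ih =>
      intro fuel acc hle
      cases fuel with
      | zero => simp at hle
      | succ fuel =>
          by_cases hq : q = c
          · subst hq
            simp only [PySem.Chars.replace.go, List.isPrefixOf]
            simp only [List.length_cons] at hle
            simpa using ih fuel acc (by omega)
          · have hne : (q == c) = false := by simp [hq]
            simp only [PySem.Chars.replace.go, List.isPrefixOf, hne, Bool.false_and]
            simp only [List.length_cons] at hle
            rw [if_neg (by simp)]
            rw [ih fuel (c :: acc) (by omega)]
            have hcq : (c == q) = false := by simp [Ne.symm hq]
            simp [hcq]

lemma pvReplace_apos (l : List Char) :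
    PySem.Chars.replace l ['\''] [] = l.filter (fun c => !(c == '\'')) := by
  unfold PySem.Chars.replace
  rw [if_neg (by simp)]
  exact pvReplace_go_single '\'' l l.length [] (le_refl _)

lemma pvMain (l : List Char) (hdom : ∀ c ∈ l, pvDomChar c = true) :
    l.flatMap (fun c => (pvStepA c).map PySem.Chars.lowerChar) =
      ((l.filter (fun c => !(c == '\''))).map PySem.Chars.lowerChar).map pvClamp := by
  induction l with
  | nil => rfl
  | cons c t ih =>
      have hc : pvDomChar c = true := hdom c (List.mem_cons_self ..)
      have hlt : c.toNat < 128 := by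
        simp [pvDomChar] at hc; omega
      have hok := pvCharOK_of_lt c hlt
      unfold pvCharOK at hok
      have ht := ih (fun d hd => hdom d (List.mem_cons_of_mem _ hd))
      by_cases h : c = '\''
      · subst h
        simpa [List.flatMap_cons, ht] using hok
      · have hne : (c == '\'') = false := by simp [h]
        simp only [List.flatMap_cons, List.filter_cons, hne, Bool.not_false, if_pos,
          List.map_cons, ht]
        rw [hok]
        simp [hne]

-- ===== VERDICT (by name: the statement is the Claim_ definition above) =====
theorem castLow_spec : Claim_equal_castLow := by
  intro word hdom
  unfold Spec_castLow castLow castLow_alt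
  have hdom' : ∀ c ∈ word.toList, pvDomChar c = true := by
    simpa [Dom_castLow, pvDomStr, List.all_eq_true] using hdom
  have hfold : word.toList.foldl
      (fun name letter =>
        if letter.toNat == 39 then name
        else if letter.toNat < 65 ∨ (letter.toNat > 90 ∧ letter.toNat < 97) ∨ letter.toNat > 122 then
          name ++ ['-']
        else name ++ [letter]) [] = word.toList.flatMap pvStepA := by
    have hf : (fun (name : List Char) (letter : Char) =>
        if letter.toNat == 39 then name
        else if letter.toNat < 65 ∨ (letter.toNat > 90 ∧ letter.toNat < 97) ∨ letter.toNat > 122 then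
          name ++ ['-']
        else name ++ [letter]) = (fun name letter => name ++ pvStepA letter) := by
      funext name letter
      simp only [pvStepA]
      split_ifs <;> simp
    rw [hf, PySem.List.foldl_append_eq_flatMap]
    simp
  rw [hfold]
  rw [PySem.Str.replace]  -- unfold to Chars.replace on toList
  simp only [PySem.Str.lower, PySem.Chars.lower, String.toList_ofList]
  have hrep : PySem.Chars.replace word.toList "'".toList "".toList =
      word.toList.filter (fun c => !(c == '\'')) := by
    simpa using pvReplace_apos word.toList
  rw [hrep]
  rw [List.map_flatMap]
  have := pvMain word.toList hdom'
  rw [this]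
  rfl
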